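-- pv_equiv track=rewrite | github.com/ELTE-DH/BERTfluff | paper_resources/tactics.py | complex_tactic
-- ===== SOURCE A (Python) =====
-- from typing import Tuple, Generator
--
-- def complex_tactic(left_context: Tuple[str], right_context: Tuple[str], tactic: str) \
--         -> Generator[Tuple[str, str], None, None]:
--     # TODO rewrite to match the input of multi_guess_tactic (tuple of contexts != tuple of words)
--     # TODO comment, examples!
--     left_size = 0
--     right_size = 0
--     for i, step in enumerate(tactic.split('|')):
--         left_size += step.count('l')
--         right_size += step.count('r')
--         right = ' '.join(right_context[:right_size])
--         left = ' '.join(left_context[-left_size:]) if left_size else ''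
--         yield i, left, right
-- ===== SOURCE B (Python) =====
-- def complex_tactic(left_context, right_context, tactic):
--     # Incremental: keep running joined strings and extend them with only the
--     # newly added words at each step, instead of re-joining the whole slices.
--     nl = len(left_context)
--     nr = len(right_context)
--     left_size = 0
--     right_size = 0
--     eff_left = 0   # number of words currently in left_str (clamped left_size)
--     eff_right = 0  # number of words currently in right_str (clamped right_size)
--     left_str = ''
--     right_str = ''
--     for i, step in enumerate(tactic.split('|')):
--         left_size += step.count('l')
--         right_size += step.count('r')
--         new_right = min(right_size, nr)
--         if new_right > eff_right:
--             added = ' '.join(right_context[eff_right:new_right])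
--             right_str = right_str + ' ' + added if eff_right else added
--             eff_right = new_right
--         new_left = min(left_size, nl)
--         if new_left > eff_left:
--             added = ' '.join(left_context[nl - new_left:nl - eff_left])
--             left_str = added + ' ' + left_str if eff_left else added
--             eff_left = new_left
--         yield i, left_str, right_str
-- ===== Notes on version B (the rewrite author's own statement) =====
-- stated objective: alternative
-- what changed: B keeps running left/right joined strings and extends them each step by joining only the newly added words (clamped slice of the context), instead of re-joining the whole cumulative slice at every step as A does; per-step work is proportional to the new words rather than the whole prefix/suffix.
import Mathlib
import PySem

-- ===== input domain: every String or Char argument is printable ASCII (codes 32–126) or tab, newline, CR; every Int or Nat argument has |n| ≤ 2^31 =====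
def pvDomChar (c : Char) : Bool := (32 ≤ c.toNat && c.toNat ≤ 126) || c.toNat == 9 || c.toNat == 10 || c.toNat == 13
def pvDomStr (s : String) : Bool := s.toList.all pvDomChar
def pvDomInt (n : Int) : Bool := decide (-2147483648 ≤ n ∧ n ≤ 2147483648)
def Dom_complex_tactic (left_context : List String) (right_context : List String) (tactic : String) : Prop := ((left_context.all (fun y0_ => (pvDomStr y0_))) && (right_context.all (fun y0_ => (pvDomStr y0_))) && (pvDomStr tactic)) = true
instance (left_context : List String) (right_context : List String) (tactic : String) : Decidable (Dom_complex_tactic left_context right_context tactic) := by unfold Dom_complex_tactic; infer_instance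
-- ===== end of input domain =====

-- B rebuilds the cumulative context strings incrementally (joining only the newly
-- added words each step) instead of re-joining the whole slices; A mutates nothing,
-- the generator is ported as the list of yielded triples.

-- ===== PORT A =====
-- one step of A's loop: state = (left_size, right_size, yielded triples)
def pvStepA (left_context right_context : List String)
    (st : Nat × Nat × List (Int × String × String)) (p : Int × String) :
    Nat × Nat × List (Int × String × String) :=
  let ls := st.1 + PySem.Str.count p.2 "l"
  let rs := st.2.1 + PySem.Str.count p.2 "r"
  let right := PySem.Str.join " " (PySem.List.slice right_context none (some (rs : Int)))
  let left := if ls ≠ 0 then PySem.Str.join " " (PySem.List.slice left_context (some (-(ls : Int))) none) else ""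
  (ls, rs, st.2.2 ++ [(p.1, left, right)])

def complex_tactic (left_context : List String) (right_context : List String) (tactic : String) : List (Int × String × String) :=
  ((PySem.List.enumerate ((PySem.Str.split? tactic "|").getD []) 0).foldl
    (pvStepA left_context right_context) (0, 0, [])).2.2

-- ===== PORT B =====
-- one step of B's loop: state = (left_size, right_size, eff_left, eff_right, left_str, right_str, yielded triples)
def pvStepB (left_context right_context : List String)
    (st : Nat × Nat × Nat × Nat × String × String × List (Int × String × String)) (p : Int × String) :
    Nat × Nat × Nat × Nat × String × String × List (Int × String × String) :=
  let nl := left_context.length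
  let nr := right_context.length
  let ls := st.1 + PySem.Str.count p.2 "l"
  let rs := st.2.1 + PySem.Str.count p.2 "r"
  let el := st.2.2.1
  let er := st.2.2.2.1
  let L := st.2.2.2.2.1
  let R := st.2.2.2.2.2.1
  let acc := st.2.2.2.2.2.2
  let ner := min rs nr
  let R' := if er < ner then
      (let added := PySem.Str.join " " (PySem.List.slice right_context (some (er : Int)) (some (ner : Int)))
       if er ≠ 0 then R ++ " " ++ added else added)
    else R
  let er' := if er < ner then ner else er
  let nel := min ls nl
  let L' := if el < nel then
      (let added := PySem.Str.join " " (PySem.List.slice left_context (some ((nl - nel : Nat) : Int)) (some ((nl - el : Nat) : Int)))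
       if el ≠ 0 then added ++ " " ++ L else added)
    else L
  let el' := if el < nel then nel else el
  (ls, rs, el', er', L', R', acc ++ [(p.1, L', R')])

def complex_tactic_alt (left_context : List String) (right_context : List String) (tactic : String) : List (Int × String × String) :=
  ((PySem.List.enumerate ((PySem.Str.split? tactic "|").getD []) 0).foldl
    (pvStepB left_context right_context) (0, 0, 0, 0, "", "", [])).2.2.2.2.2.2

-- ===== PRECONDITION & SPEC =====
def Spec_complex_tactic (left_context : List String) (right_context : List String) (tactic : String) (out : List (Int × String × String)) : Prop := out = complex_tactic_alt left_context right_context tactic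
instance (left_context : List String) (right_context : List String) (tactic : String) (out : List (Int × String × String)) : Decidable (Spec_complex_tactic left_context right_context tactic out) := by unfold Spec_complex_tactic; infer_instance

-- ===== CLAIM (what is proved, stated in full; the proofs are below) =====
def Claim_equal_complex_tactic : Prop := ∀ (left_context : List String) (right_context : List String) (tactic : String), Dom_complex_tactic left_context right_context tactic → Spec_complex_tactic left_context right_context tactic (complex_tactic left_context right_context tactic)

-- ===== LEMMAS AND PROOFS =====

lemma chars_join_append (sep : List Char) (l1 l2 : List (List Char)) (h1 : l1 ≠ []) (h2 : l2 ≠ []) :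
    PySem.Chars.join sep (l1 ++ l2) = PySem.Chars.join sep l1 ++ sep ++ PySem.Chars.join sep l2 := by
  induction l1 with
  | nil => exact absurd rfl h1
  | cons x t ih =>
    cases t with
    | nil =>
      cases l2 with
      | nil => exact absurd rfl h2
      | cons y ys => simp [PySem.Chars.join_cons_cons, PySem.Chars.join_singleton]
    | cons a t' =>
      have := ih (by simp)
      simp only [List.cons_append] at *
      rw [PySem.Chars.join_cons_cons, PySem.Chars.join_cons_cons, this]
      simp [List.append_assoc]
lemma str_join_append (l1 l2 : List String) (h1 : l1 ≠ []) (h2 : l2 ≠ []) :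
    PySem.Str.join " " (l1 ++ l2) = PySem.Str.join " " l1 ++ " " ++ PySem.Str.join " " l2 := by
  apply String.toList_inj.mp
  simp only [PySem.Str.toList_join, String.toList_append, List.map_append]
  rw [chars_join_append _ _ _ (by simpa using h1) (by simpa using h2)]

lemma take_join_ext (rc : List String) (er ner : Nat) (h1 : er < ner) (h2 : ner ≤ rc.length) :
    PySem.Str.join " " (rc.take ner) =
      if er ≠ 0 then PySem.Str.join " " (rc.take er) ++ " " ++ PySem.Str.join " " ((rc.drop er).take (ner - er))
      else PySem.Str.join " " ((rc.drop er).take (ner - er)) := by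
  have hsplit : rc.take ner = rc.take er ++ (rc.drop er).take (ner - er) := by
    rw [← List.take_add]; congr 1; omega
  by_cases h : er = 0
  · simp [h]
  · rw [if_pos h]
    have e1 : rc.take er ≠ [] := by
      apply List.ne_nil_of_length_pos; rw [List.length_take]; omega
    have e2 : (rc.drop er).take (ner - er) ≠ [] := by
      apply List.ne_nil_of_length_pos; rw [List.length_take, List.length_drop]; omega
    rw [hsplit, str_join_append _ _ e1 e2]

lemma drop_join_ext (lc : List String) (el nel : Nat) (h1 : el < nel) (h2 : nel ≤ lc.length) :
    PySem.Str.join " " (lc.drop (lc.length - nel)) =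
      if el ≠ 0 then PySem.Str.join " " ((lc.drop (lc.length - nel)).take (nel - el)) ++ " " ++ PySem.Str.join " " (lc.drop (lc.length - el))
      else PySem.Str.join " " ((lc.drop (lc.length - nel)).take (nel - el)) := by
  have hsplit : lc.drop (lc.length - nel) = (lc.drop (lc.length - nel)).take (nel - el) ++ lc.drop (lc.length - el) := by
    conv_lhs => rw [← List.take_append_drop (nel - el) (lc.drop (lc.length - nel))]
    congr 1
    rw [List.drop_drop]; congr 1; omega
  by_cases h : el = 0
  · rw [if_neg (by simp [h])]
    subst h
    congr 1
    rw [Nat.sub_zero, List.take_of_length_le]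
    rw [List.length_drop]; omega
  · rw [if_pos h]
    have e1 : (lc.drop (lc.length - nel)).take (nel - el) ≠ [] := by
      apply List.ne_nil_of_length_pos; rw [List.length_take, List.length_drop]; omega
    have e2 : lc.drop (lc.length - el) ≠ [] := by
      apply List.ne_nil_of_length_pos; rw [List.length_drop]; omega
    conv_lhs => rw [hsplit]
    rw [str_join_append _ _ e1 e2]

lemma stepA_eq (lc rc : List String) (ls rs : Nat) (acc : List (Int × String × String)) (p : Int × String) :
    pvStepA lc rc (ls, rs, acc) p =
      (ls + PySem.Str.count p.2 "l", rs + PySem.Str.count p.2 "r",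
       acc ++ [(p.1,
         PySem.Str.join " " (lc.drop (lc.length - min (ls + PySem.Str.count p.2 "l") lc.length)),
         PySem.Str.join " " (rc.take (min (rs + PySem.Str.count p.2 "r") rc.length)))]) := by
  unfold pvStepA
  simp only []
  set ls' := ls + PySem.Str.count p.2 "l" with hls'
  set rs' := rs + PySem.Str.count p.2 "r" with hrs'
  have hr : PySem.List.slice rc none (some ((rs' : Nat) : Int)) = rc.take (min rs' rc.length) := by
    rw [PySem.List.slice_to_natCast, List.take_eq_take_min]
  have hl : (if ls' ≠ 0 then PySem.Str.join " " (PySem.List.slice lc (some (-((ls' : Nat) : Int))) none) else "")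
      = PySem.Str.join " " (lc.drop (lc.length - min ls' lc.length)) := by
    by_cases h : ls' = 0
    · rw [if_neg (by simp [h]), h]
      simp [List.drop_length]
      rfl
    · rw [if_pos h, PySem.List.slice_from_neg_natCast lc ls' (by omega)]
      congr 2
      omega
  rw [hr, hl]

lemma stepB_eq (lc rc : List String) (ls rs : Nat) (acc : List (Int × String × String)) (p : Int × String) :
    pvStepB lc rc (ls, rs, min ls lc.length, min rs rc.length,
        PySem.Str.join " " (lc.drop (lc.length - min ls lc.length)),
        PySem.Str.join " " (rc.take (min rs rc.length)), acc) p =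
      (ls + PySem.Str.count p.2 "l", rs + PySem.Str.count p.2 "r",
       min (ls + PySem.Str.count p.2 "l") lc.length, min (rs + PySem.Str.count p.2 "r") rc.length,
       PySem.Str.join " " (lc.drop (lc.length - min (ls + PySem.Str.count p.2 "l") lc.length)),
       PySem.Str.join " " (rc.take (min (rs + PySem.Str.count p.2 "r") rc.length)),
       acc ++ [(p.1,
         PySem.Str.join " " (lc.drop (lc.length - min (ls + PySem.Str.count p.2 "l") lc.length)),
         PySem.Str.join " " (rc.take (min (rs + PySem.Str.count p.2 "r") rc.length)))]) := by
  unfold pvStepB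
  simp only []
  set nl := lc.length with hnl
  set nr := rc.length with hnr
  set ls' := ls + PySem.Str.count p.2 "l" with hls'
  set rs' := rs + PySem.Str.count p.2 "r" with hrs'
  have hR : (if min rs nr < min rs' nr then
        (if min rs nr ≠ 0 then PySem.Str.join " " (rc.take (min rs nr)) ++ " " ++ PySem.Str.join " " (PySem.List.slice rc (some ((min rs nr : Nat) : Int)) (some ((min rs' nr : Nat) : Int)))
         else PySem.Str.join " " (PySem.List.slice rc (some ((min rs nr : Nat) : Int)) (some ((min rs' nr : Nat) : Int))))
      else PySem.Str.join " " (rc.take (min rs nr))) = PySem.Str.join " " (rc.take (min rs' nr)) := by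
    by_cases hlt : min rs nr < min rs' nr
    · rw [if_pos hlt, PySem.List.slice_natCast,
        take_join_ext rc (min rs nr) (min rs' nr) hlt (by omega)]
    · rw [if_neg hlt]
      have : min rs nr = min rs' nr := by omega
      rw [this]
  have hL : (if min ls nl < min ls' nl then
        (if min ls nl ≠ 0 then PySem.Str.join " " (PySem.List.slice lc (some ((nl - min ls' nl : Nat) : Int)) (some ((nl - min ls nl : Nat) : Int))) ++ " " ++ PySem.Str.join " " (lc.drop (nl - min ls nl))
         else PySem.Str.join " " (PySem.List.slice lc (some ((nl - min ls' nl : Nat) : Int)) (some ((nl - min ls nl : Nat) : Int))))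
      else PySem.Str.join " " (lc.drop (nl - min ls nl))) = PySem.Str.join " " (lc.drop (nl - min ls' nl)) := by
    by_cases hlt : min ls nl < min ls' nl
    · rw [if_pos hlt, PySem.List.slice_natCast]
      have harith : (nl - min ls nl) - (nl - min ls' nl) = min ls' nl - min ls nl := by omega
      rw [harith, drop_join_ext lc (min ls nl) (min ls' nl) hlt (by omega)]
    · rw [if_neg hlt]
      have : min ls nl = min ls' nl := by omega
      rw [this]
  rw [hR, hL]
  have h3 : (if min ls nl < min ls' nl then min ls' nl else min ls nl) = min ls' nl := by
    split_ifs with h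
    · rfl
    · omega
  have h4 : (if min rs nr < min rs' nr then min rs' nr else min rs nr) = min rs' nr := by
    split_ifs with h
    · rfl
    · omega
  rw [h3, h4]

lemma loop_eq (lc rc : List String) (steps : List String) : ∀ (i : Int) (ls rs : Nat) (acc : List (Int × String × String)),
    ((PySem.List.enumerate steps i).foldl (pvStepA lc rc) (ls, rs, acc)).2.2 =
    ((PySem.List.enumerate steps i).foldl (pvStepB lc rc)
      (ls, rs, min ls lc.length, min rs rc.length,
       PySem.Str.join " " (lc.drop (lc.length - min ls lc.length)),
       PySem.Str.join " " (rc.take (min rs rc.length)), acc)).2.2.2.2.2.2 := by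
  induction steps with
  | nil => intro i ls rs acc; simp [PySem.List.enumerate]
  | cons s t ih =>
    intro i ls rs acc
    simp only [PySem.List.enumerate_cons, List.foldl_cons]
    rw [stepA_eq, stepB_eq]
    exact ih (i + 1) _ _ _

-- ===== VERDICT (by name: the statement is the Claim_ definition above) =====
theorem complex_tactic_spec : Claim_equal_complex_tactic := by
  intro lc rc tactic _
  unfold Spec_complex_tactic complex_tactic complex_tactic_alt
  have h := loop_eq lc rc ((PySem.Str.split? tactic "|").getD []) 0 0 0 []
  simpa using h
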